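-- pv_equiv track=rewrite | github.com/strato-space/fast-agent | src/fast_agent/cli/commands/demo.py | _build_interspersed
-- ===== SOURCE A (Python) =====
-- def _repeat_sentence(sentence: str, min_chars: int) -> str:
--     chunks: list[str] = []
--     total = 0
--     while total < min_chars:
--         chunks.append(sentence)
--         total += len(sentence) + 1
--     return " ".join(chunks)
--
-- def _build_interspersed(scale: int) -> str:
--     content = ["### Interspersed Stress Mix", ""]
--     for idx in range(max(3, scale + 1)):
--         content.append(
--             _repeat_sentence(
--                 "Interleaved content should keep rendering stable while truncating.",
--                 240 + idx * 40,
--             )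
--         )
--         content.append("")
--         content.extend(
--             [
--                 "| Metric | Value |",
--                 "| --- | --- |",
--                 f"| step | {idx} |",
--                 f"| score | {idx * 7} |",
--                 "",
--                 "```bash",
--                 f"echo \"round {idx}\"",
--                 "sleep 1",
--                 "```",
--                 "",
--             ]
--         )
--     return "\n".join(content)
-- ===== SOURCE B (Python) =====
-- SENTENCE = "Interleaved content should keep rendering stable while truncating."
--
-- def _repeat_sentence(sentence: str, min_chars: int) -> str:
--     step = len(sentence) + 1
--     n = max(0, -(-min_chars // step))
--     return " ".join([sentence] * n)
--
-- def _block(idx: int) -> list: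
--     return [
--         _repeat_sentence(SENTENCE, 240 + idx * 40),
--         "",
--         "| Metric | Value |",
--         "| --- | --- |",
--         f"| step | {idx} |",
--         f"| score | {idx * 7} |",
--         "",
--         "```bash",
--         f"echo \"round {idx}\"",
--         "sleep 1",
--         "```",
--         "",
--     ]
--
-- def _build_interspersed(scale: int) -> str:
--     lines = ["### Interspersed Stress Mix", ""]
--     lines += [line for idx in range(max(3, scale + 1)) for line in _block(idx)]
--     return "\n".join(lines)
-- ===== Notes on version B (the rewrite author's own statement) =====
-- stated objective: simpler
-- what changed: The while-loop accumulation in _repeat_sentence is replaced by a closed-form ceiling-division count with ' '.join([sentence]*n), and the outer append/extend loop becomes a flat comprehension over per-index blocks joined once.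
import Mathlib
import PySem

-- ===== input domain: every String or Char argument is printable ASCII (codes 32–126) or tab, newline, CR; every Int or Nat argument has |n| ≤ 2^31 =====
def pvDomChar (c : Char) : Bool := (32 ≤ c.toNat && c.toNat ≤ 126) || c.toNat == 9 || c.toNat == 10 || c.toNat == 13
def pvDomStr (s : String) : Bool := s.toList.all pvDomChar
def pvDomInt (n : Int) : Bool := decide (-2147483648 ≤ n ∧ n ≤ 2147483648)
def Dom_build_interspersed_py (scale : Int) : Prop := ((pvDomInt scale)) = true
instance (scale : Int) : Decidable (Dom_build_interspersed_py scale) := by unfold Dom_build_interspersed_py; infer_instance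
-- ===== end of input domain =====

-- B replaces A's while-loop accumulation by a closed-form ceiling-division count and a flat
-- comprehension over per-index blocks (objective: simpler; same output on every input).

-- ===== PORT A =====
-- while total < min_chars: chunks.append(sentence); total += len(sentence) + 1
def pvRepeatLoop (s : String) (min_chars : Int) (chunks : List String) (total : Int) : List String :=
  if total < min_chars then
    pvRepeatLoop s min_chars (chunks ++ [s]) (total + (PySem.Str.len s + 1))
  else chunks
termination_by (min_chars - total).toNat
decreasing_by
  have h0 : (0:Int) ≤ PySem.Str.len s := by simp [PySem.Str.len_eq]
  omega

def repeat_sentence_py (sentence : String) (min_chars : Int) : String :=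
  PySem.Str.join " " (pvRepeatLoop sentence min_chars [] 0)

def build_interspersed_py (scale : Int) : String :=
  let content : List String :=
    (PySem.List.pyRange 0 (max 3 (scale + 1)) 1).foldl
      (fun content idx =>
        ((content ++
          [repeat_sentence_py "Interleaved content should keep rendering stable while truncating."
            (240 + idx * 40)]) ++ [""]) ++
        ["| Metric | Value |",
         "| --- | --- |",
         "| step | " ++ PySem.Int.toStr idx ++ " |",
         "| score | " ++ PySem.Int.toStr (idx * 7) ++ " |",
         "",
         "```bash",
         "echo \"round " ++ PySem.Int.toStr idx ++ "\"",
         "sleep 1",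
         "```",
         ""])
      ["### Interspersed Stress Mix", ""]
  PySem.Str.join "\n" content

-- ===== PORT B =====
def pvSentence : String := "Interleaved content should keep rendering stable while truncating."

def repeat_sentence_alt (sentence : String) (min_chars : Int) : String :=
  let step := PySem.Str.len sentence + 1
  let n := max 0 (-(PySem.Int.floordiv (-min_chars) step))
  PySem.Str.join " " (List.replicate n.toNat sentence)

def pvBlock (idx : Int) : List String :=
  [repeat_sentence_alt pvSentence (240 + idx * 40),
   "",
   "| Metric | Value |",
   "| --- | --- |",
   "| step | " ++ PySem.Int.toStr idx ++ " |",
   "| score | " ++ PySem.Int.toStr (idx * 7) ++ " |",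
   "",
   "```bash",
   "echo \"round " ++ PySem.Int.toStr idx ++ "\"",
   "sleep 1",
   "```",
   ""]

def build_interspersed_py_alt (scale : Int) : String :=
  let lines : List String :=
    ["### Interspersed Stress Mix", ""] ++
      (PySem.List.pyRange 0 (max 3 (scale + 1)) 1).flatMap pvBlock
  PySem.Str.join "\n" lines

-- ===== PRECONDITION & SPEC =====
def Spec_build_interspersed_py (scale : Int) (out : String) : Prop := out = build_interspersed_py_alt scale
instance (scale : Int) (out : String) : Decidable (Spec_build_interspersed_py scale out) := by unfold Spec_build_interspersed_py; infer_instance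

-- ===== CLAIM (what is proved, stated in full; the proofs are below) =====
def Claim_equal_build_interspersed_py : Prop := ∀ (scale : Int), Dom_build_interspersed_py scale → Spec_build_interspersed_py scale (build_interspersed_py scale)

-- ===== LEMMAS AND PROOFS =====

-- A's while-loop appends exactly n copies of s whenever n brackets min_chars - total.
theorem pvRepeatLoop_replicate (s : String) :
    ∀ (n : Nat) (m total : Int) (chunks : List String),
      ((n : Int) - 1) * (PySem.Str.len s + 1) < m - total →
      m - total ≤ (n : Int) * (PySem.Str.len s + 1) →
      pvRepeatLoop s m chunks total = chunks ++ List.replicate n s := by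
  intro n
  induction n with
  | zero =>
    intro m total chunks _ h2
    have hstep : (0:Int) ≤ PySem.Str.len s := by simp [PySem.Str.len_eq]
    rw [pvRepeatLoop]
    simp only [Int.natCast_zero, zero_mul] at h2
    rw [if_neg (by omega)]
    simp
  | succ k ih =>
    intro m total chunks h1 h2
    have hstep : (0:Int) ≤ PySem.Str.len s := by simp [PySem.Str.len_eq]
    set L : Int := PySem.Str.len s + 1 with hL
    have hkL : (0:Int) ≤ (k : Int) * L := by positivity
    have h1' : (k : Int) * L < m - total := by
      have : ((k:Int) + 1 - 1) * L = (k:Int) * L := by ring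
      simpa [this] using (by push_cast at h1 ⊢; linarith : ((k:Int) + 1 - 1) * L < m - total)
    have hlt : total < m := by omega
    rw [pvRepeatLoop, if_pos hlt]
    have := ih m (total + L) (chunks ++ [s])
      (by have : ((k:Int) - 1) * L = ((k:Int)+1-1) * L - L := by ring
          rw [this]; push_cast at h1 ⊢; linarith)
      (by have : (k:Int) * L = ((k:Int)+1) * L - L := by ring
          rw [this]; push_cast at h2 ⊢; linarith)
    rw [this]
    simp [List.replicate_succ]

-- The helpers agree for every sentence and every min_chars.
theorem repeat_sentence_eq (s : String) (m : Int) :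
    repeat_sentence_py s m = repeat_sentence_alt s m := by
  show PySem.Str.join " " (pvRepeatLoop s m [] 0) =
    PySem.Str.join " "
      (List.replicate (max 0 (-(PySem.Int.floordiv (-m) (PySem.Str.len s + 1)))).toNat s)
  have hstep : (0:Int) < PySem.Str.len s + 1 := by
    have : (0:Int) ≤ PySem.Str.len s := by simp [PySem.Str.len_eq]
    omega
  set L : Int := PySem.Str.len s + 1 with hL
  set c : Int := -(PySem.Int.floordiv (-m) L) with hc
  have hbr : (c - 1) * L < m ∧ m ≤ c * L :=
    (PySem.Int.neg_floordiv_neg_eq_iff_of_pos hstep).mp hc.symm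
  by_cases hm : m ≤ 0
  · have hc0 : c ≤ 0 := by
      by_contra h
      have h1 : (1:Int) ≤ c := by omega
      have : (0:Int) ≤ (c - 1) * L := mul_nonneg (by omega) (by omega)
      omega
    have : max 0 c = 0 := by omega
    rw [this]
    rw [pvRepeatLoop, if_neg (by omega)]
    simp
  · have hc1 : (1:Int) ≤ c := by
      by_contra h
      have hc0 : c ≤ 0 := by omega
      have : c * L ≤ 0 := mul_nonpos_of_nonpos_of_nonneg hc0 (by omega)
      omega
    have hmax : max 0 c = c := by omega
    rw [hmax]
    have hcast : ((c.toNat : Int)) = c := Int.toNat_of_nonneg (by omega)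
    rw [pvRepeatLoop_replicate s c.toNat m 0 []
      (by rw [hcast, ← hL]; omega) (by rw [hcast, ← hL]; omega)]
    simp

-- One iteration of A's body appends exactly B's block for that index.
theorem fold_body_eq (acc : List String) (idx : Int) :
    ((acc ++
      [repeat_sentence_py "Interleaved content should keep rendering stable while truncating."
        (240 + idx * 40)]) ++ [""]) ++
      ["| Metric | Value |",
       "| --- | --- |",
       "| step | " ++ PySem.Int.toStr idx ++ " |",
       "| score | " ++ PySem.Int.toStr (idx * 7) ++ " |",
       "",
       "```bash",
       "echo \"round " ++ PySem.Int.toStr idx ++ "\"",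
       "sleep 1",
       "```",
       ""] = acc ++ pvBlock idx := by
  simp [pvBlock, pvSentence, repeat_sentence_eq]

theorem foldl_blocks (r : List Int) :
    ∀ (acc : List String),
      r.foldl
        (fun content idx =>
          ((content ++
            [repeat_sentence_py "Interleaved content should keep rendering stable while truncating."
              (240 + idx * 40)]) ++ [""]) ++
          ["| Metric | Value |",
           "| --- | --- |",
           "| step | " ++ PySem.Int.toStr idx ++ " |",
           "| score | " ++ PySem.Int.toStr (idx * 7) ++ " |",
           "",
           "```bash",
           "echo \"round " ++ PySem.Int.toStr idx ++ "\"",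
           "sleep 1",
           "```",
           ""]) acc = acc ++ r.flatMap pvBlock := by
  induction r with
  | nil => intro acc; simp
  | cons x xs ih =>
    intro acc
    simp only [List.foldl_cons, List.flatMap_cons]
    rw [fold_body_eq, ih, List.append_assoc]

-- ===== VERDICT (by name: the statement is the Claim_ definition above) =====
theorem build_interspersed_py_spec : Claim_equal_build_interspersed_py := by
  intro scale _
  unfold Spec_build_interspersed_py build_interspersed_py build_interspersed_py_alt
  rw [foldl_blocks]
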